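-- pv_equiv track=rewrite | github.com/MoonLBH/Apindel | model_creation/glove.py | countCOOC
-- ===== SOURCE A (Python) =====
-- def countCOOC(cooccurrence, window, coreIndex):
--     for index in range(len(window)):
--         if index == coreIndex:
--             continue
--         else:
--             cooccurrence[window[coreIndex]][window[index]
--                                             ] = cooccurrence[window[coreIndex]][window[index]] + 1
--     return cooccurrence
-- ===== SOURCE B (Python) =====
-- def countCOOC(cooccurrence, window, coreIndex):
--     # Aggregate-first: tally neighbor words by position, then apply each
--     # (word, count) once to the core row.  Mutates cooccurrence in place like A.
--     counts = {}
--     for i, word in enumerate(window):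
--         if i != coreIndex:
--             counts[word] = counts.get(word, 0) + 1
--     if counts:
--         row = cooccurrence[window[coreIndex]]
--         for word, c in counts.items():
--             row[word] = row[word] + c
--     return cooccurrence
-- ===== Notes on version B (the rewrite author's own statement) =====
-- stated objective: alternative
-- what changed: B first aggregates the neighbor words of the window into a count dictionary (one tally per position i != coreIndex) and then applies each (word, count) pair once to the core row, instead of A's one read-modify-write of the cooccurrence row per position.
import Mathlib
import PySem

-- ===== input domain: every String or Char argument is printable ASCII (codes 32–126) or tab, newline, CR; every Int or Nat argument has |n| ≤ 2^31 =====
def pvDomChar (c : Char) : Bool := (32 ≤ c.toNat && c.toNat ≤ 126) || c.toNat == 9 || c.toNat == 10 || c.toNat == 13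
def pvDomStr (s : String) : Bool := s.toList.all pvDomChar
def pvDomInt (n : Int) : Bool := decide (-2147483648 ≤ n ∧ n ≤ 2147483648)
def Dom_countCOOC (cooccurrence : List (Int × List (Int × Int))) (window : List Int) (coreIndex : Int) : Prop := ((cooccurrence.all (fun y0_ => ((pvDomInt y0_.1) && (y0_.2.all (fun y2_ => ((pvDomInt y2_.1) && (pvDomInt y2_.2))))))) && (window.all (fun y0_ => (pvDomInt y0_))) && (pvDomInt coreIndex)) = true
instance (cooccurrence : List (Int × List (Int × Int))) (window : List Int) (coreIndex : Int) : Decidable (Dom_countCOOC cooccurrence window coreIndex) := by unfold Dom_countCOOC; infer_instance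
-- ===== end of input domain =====

-- B aggregates neighbor words into a count dict first, then applies each (word, count) once to the
-- core row (A updates the row once per position); both Pythons mutate `cooccurrence` in place the
-- same way, the equivalence proved here is about the returned mapping.


-- dict-of-dicts ↔ association-list boundary converters (shared plumbing, not algorithm)
def coocToD (c : List (Int × List (Int × Int))) : PySem.Dict Int (PySem.Dict Int Int) :=
  PySem.Dict.mk (c.map (fun p => (p.1, PySem.Dict.mk p.2)))
def coocFromD (d : PySem.Dict Int (PySem.Dict Int Int)) : List (Int × List (Int × Int)) :=
  d.items.map (fun p => (p.1, p.2.items))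

-- ===== PORT A =====
-- one loop iteration of A: cooccurrence[window[coreIndex]][window[index]] += 1 (skip when index == coreIndex;
-- pyGet?/get? return none exactly where Python raises IndexError/KeyError — those inputs are outside Pre_)
def stepA (w : List Int) (k : Int) (acc : PySem.Dict Int (PySem.Dict Int Int)) (i : Int) :
    PySem.Dict Int (PySem.Dict Int Int) :=
  if i = k then acc
  else
    match PySem.List.pyGet? w k, PySem.List.pyGet? w i with
    | some core, some wi =>
      match acc.get? core with
      | some row =>
        match row.get? wi with
        | some v => acc.insert core (row.insert wi (v + 1))
        | none => acc
      | none => acc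
    | _, _ => acc

def countCOOC (cooccurrence : List (Int × List (Int × Int))) (window : List Int) (coreIndex : Int) : List (Int × List (Int × Int)) :=
  coocFromD ((PySem.List.pyRange 0 (window.length : Int) 1).foldl (stepA window coreIndex) (coocToD cooccurrence))

-- ===== PORT B =====
def countCOOC_alt (cooccurrence : List (Int × List (Int × Int))) (window : List Int) (coreIndex : Int) : List (Int × List (Int × Int)) :=
  let counts : PySem.Dict Int Int :=
    (PySem.List.enumerate window).foldl
      (fun d p => if p.1 = coreIndex then d else d.insert p.2 (d.getD p.2 0 + 1))
      PySem.Dict.empty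
  if counts.items.isEmpty then cooccurrence
  else
    match PySem.List.pyGet? window coreIndex with
    | none => cooccurrence
    | some core =>
      match (coocToD cooccurrence).get? core with
      | none => cooccurrence
      | some row =>
        coocFromD ((coocToD cooccurrence).insert core
          (counts.items.foldl
            (fun r p =>
              match r.get? p.1 with
              | some v => r.insert p.1 (v + p.2)
              | none => r) row))

-- ===== PRECONDITION & SPEC =====
-- Pre_ excludes (a) inputs where A raises (IndexError on window[coreIndex], KeyError on a missing
-- outer or row key) and (b) association lists whose outer keys repeat,
-- which represent no Python dict (a dict cannot carry duplicate keys, so no input of the Python A is excluded).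
def preCOOC (cooccurrence : List (Int × List (Int × Int))) (window : List Int) (coreIndex : Int) : Bool :=
  decide (cooccurrence.map (·.1)).Nodup &&
  (List.range window.length).all (fun i => ((i : Int) == coreIndex) ||
    match PySem.List.pyGet? window coreIndex with
    | none => false
    | some core =>
      match (coocToD cooccurrence).get? core with
      | none => false
      | some row => (row.get? (window.getD i 0)).isSome)
def Pre_countCOOC (cooccurrence : List (Int × List (Int × Int))) (window : List Int) (coreIndex : Int) : Prop :=
  preCOOC cooccurrence window coreIndex = true
instance (cooccurrence : List (Int × List (Int × Int))) (window : List Int) (coreIndex : Int) : Decidable (Pre_countCOOC cooccurrence window coreIndex) := by unfold Pre_countCOOC; infer_instance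
def pvWitness_countCOOC : (List (Int × List (Int × Int))) × List Int × Int := ([(1, [(2, 0)])], [1, 2], 0)

def Spec_countCOOC (cooccurrence : List (Int × List (Int × Int))) (window : List Int) (coreIndex : Int) (out : List (Int × List (Int × Int))) : Prop := out = countCOOC_alt cooccurrence window coreIndex
instance (cooccurrence : List (Int × List (Int × Int))) (window : List Int) (coreIndex : Int) (out : List (Int × List (Int × Int))) : Decidable (Spec_countCOOC cooccurrence window coreIndex out) := by unfold Spec_countCOOC; infer_instance

-- ===== CLAIM (what is proved, stated in full; the proofs are below) =====
def Claim_equal_countCOOC : Prop := ∀ (cooccurrence : List (Int × List (Int × Int))) (window : List Int) (coreIndex : Int), Dom_countCOOC cooccurrence window coreIndex → Pre_countCOOC cooccurrence window coreIndex → Spec_countCOOC cooccurrence window coreIndex (countCOOC cooccurrence window coreIndex)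

-- ===== LEMMAS AND PROOFS =====
-- `row[x] = row[x] + m` with KeyError modelled as a skip (the shape both ports' row updates share)
def incBy (r : PySem.Dict Int Int) (x m : Int) : PySem.Dict Int Int :=
  match r.get? x with
  | some v => r.insert x (v + m)
  | none => r

theorem incBy_of_none (r : PySem.Dict Int Int) (x m : Int) (h : r.get? x = none) :
    incBy r x m = r := by
  simp [incBy, h]

theorem incBy_of_some (r : PySem.Dict Int Int) (x m v : Int) (h : r.get? x = some v) :
    incBy r x m = r.insert x (v + m) := by
  simp [incBy, h]

theorem get?_incBy_ne (r : PySem.Dict Int Int) (x m y : Int) (h : y ≠ x) :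
    (incBy r x m).get? y = r.get? y := by
  cases hx : r.get? x with
  | none => rw [incBy_of_none r x m hx]
  | some v => rw [incBy_of_some r x m v hx]; exact PySem.Dict.get?_insert_of_ne r _ h

theorem incBy_add (r : PySem.Dict Int Int) (x a b : Int) :
    incBy r x (a + b) = incBy (incBy r x a) x b := by
  cases hx : r.get? x with
  | none =>
    rw [incBy_of_none r x (a + b) hx, incBy_of_none r x a hx, incBy_of_none r x b hx]
  | some v =>
    rw [incBy_of_some r x (a + b) v hx, incBy_of_some r x a v hx,
        incBy_of_some (r.insert x (v + a)) x b (v + a) (PySem.Dict.get?_insert_self r x (v + a)),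
        PySem.Dict.insert_insert_self, add_assoc]

theorem insert_insert_comm_of_contains (r : PySem.Dict Int Int) (x y a b : Int)
    (hne : x ≠ y) (hx : r.contains x = true) (hy : r.contains y = true) :
    (r.insert x a).insert y b = (r.insert y b).insert x a := by
  apply PySem.Dict.ext
  have hx' : (r.insert y b).contains x = true := by
    simp [PySem.Dict.contains_insert, hx]
  have hy' : (r.insert x a).contains y = true := by
    simp [PySem.Dict.contains_insert, hy]
  rw [PySem.Dict.items_insert_of_contains _ _ hy', PySem.Dict.items_insert_of_contains _ _ hx,
      PySem.Dict.items_insert_of_contains _ _ hx', PySem.Dict.items_insert_of_contains _ _ hy]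
  simp only [List.map_map]
  apply List.map_congr_left
  intro p _
  by_cases h1 : p.1 = x <;> by_cases h2 : p.1 = y <;>
    simp [Function.comp, h1, h2, hne, Ne.symm hne]

theorem incBy_comm (r : PySem.Dict Int Int) (x y a b : Int) (hne : x ≠ y) :
    incBy (incBy r x a) y b = incBy (incBy r y b) x a := by
  cases hx : r.get? x with
  | none =>
    have h2 : (incBy r y b).get? x = none := by rw [get?_incBy_ne r y b x hne, hx]
    rw [incBy_of_none r x a hx, incBy_of_none (incBy r y b) x a h2]
  | some vx =>
    cases hy : r.get? y with
    | none =>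
      have h2 : (incBy r x a).get? y = none := by
        rw [get?_incBy_ne r x a y (Ne.symm hne), hy]
      rw [incBy_of_none r y b hy, incBy_of_none (incBy r x a) y b h2]
    | some vy =>
      have cx : r.contains x = true := by rw [PySem.Dict.contains_eq_isSome_get?, hx]; rfl
      have cy : r.contains y = true := by rw [PySem.Dict.contains_eq_isSome_get?, hy]; rfl
      have g1 : (r.insert x (vx + a)).get? y = some vy := by
        rw [PySem.Dict.get?_insert_of_ne _ _ (Ne.symm hne), hy]
      have g2 : (r.insert y (vy + b)).get? x = some vx := by
        rw [PySem.Dict.get?_insert_of_ne _ _ hne, hx]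
      rw [incBy_of_some r x a vx hx, incBy_of_some r y b vy hy,
          incBy_of_some _ y b vy g1, incBy_of_some _ x a vx g2]
      exact insert_insert_comm_of_contains r x y (vx + a) (vy + b) hne cx cy

theorem foldl_incBy_comm (l : List (Int × Int)) (x a : Int) :
    ∀ (r : PySem.Dict Int Int), (∀ p ∈ l, p.1 ≠ x) →
      l.foldl (fun r p => incBy r p.1 p.2) (incBy r x a) =
      incBy (l.foldl (fun r p => incBy r p.1 p.2) r) x a := by
  induction l with
  | nil => intro r _; rfl
  | cons p t ih =>
    intro r h
    have hp : p.1 ≠ x := h p (by simp)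
    simp only [List.foldl_cons]
    rw [incBy_comm r x p.1 a p.2 (fun he => hp he.symm)]
    exact ih _ (fun q hq => h q (by simp [hq]))

theorem insert_items_cons_ne {ν : Type} (y : Int) (v : ν) (rest : List (Int × ν)) (x : Int) (w : ν)
    (h : y ≠ x) :
    ((PySem.Dict.mk ((y, v) :: rest)).insert x w).items =
      (y, v) :: ((PySem.Dict.mk rest).insert x w).items := by
  by_cases hc : (PySem.Dict.mk rest).contains x = true
  · have hc' : (PySem.Dict.mk ((y, v) :: rest)).contains x = true := by
      rw [PySem.Dict.contains_mk] at hc ⊢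
      simp [List.any_cons, hc]
    rw [PySem.Dict.items_insert_of_contains _ _ hc', PySem.Dict.items_insert_of_contains _ _ hc]
    simp [h]
  · have hc2 := Bool.eq_false_iff.mpr hc
    have hc' : (PySem.Dict.mk ((y, v) :: rest)).contains x = false := by
      rw [PySem.Dict.contains_mk] at hc2 ⊢
      simp [List.any_cons, hc2, h]
    rw [PySem.Dict.items_insert_of_not_contains _ _ hc',
        PySem.Dict.items_insert_of_not_contains _ _ hc2]
    rfl

theorem insert_items_cons_self {ν : Type} (x : Int) (v : ν) (rest : List (Int × ν)) (w : ν)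
    (h : x ∉ rest.map (·.1)) :
    ((PySem.Dict.mk ((x, v) :: rest)).insert x w).items = (x, w) :: rest := by
  have hc : (PySem.Dict.mk ((x, v) :: rest)).contains x = true := by
    rw [PySem.Dict.contains_mk]; simp
  rw [PySem.Dict.items_insert_of_contains _ _ hc]
  simp only [List.map_cons, beq_self_eq_true, if_pos]
  congr 1
  conv_rhs => rw [← List.map_id rest]
  apply List.map_congr_left
  intro p hp
  have hpx : p.1 ≠ x := by
    intro he
    exact h (he ▸ List.mem_map_of_mem hp)
  simp [hpx]

theorem insert_eq_self_of_nodup {ν : Type} (l : List (Int × ν)) :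
    ∀ (k : Int) (v : ν), (l.map (·.1)).Nodup → (PySem.Dict.mk l).get? k = some v →
      (PySem.Dict.mk l).insert k v = PySem.Dict.mk l := by
  induction l with
  | nil => intro k v _ hg; simp [PySem.Dict.get?] at hg
  | cons p t ih =>
    intro k v hnd hg
    obtain ⟨y, u⟩ := p
    rw [List.map_cons, List.nodup_cons] at hnd
    apply PySem.Dict.ext
    by_cases hyk : y = k
    · subst hyk
      rw [PySem.Dict.get?_mk_cons] at hg
      simp at hg
      rw [insert_items_cons_self y u t v (by simpa using hnd.1), hg]
    · rw [PySem.Dict.get?_mk_cons, if_neg (by simpa using hyk)] at hg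
      rw [insert_items_cons_ne y u t k v hyk]
      have := ih k v hnd.2 hg
      rw [this]

-- applying the count dictionary after a fresh tally of x equals tallying x afterwards
theorem foldl_items_insert_inc (dl : List (Int × Int)) :
    ∀ (x : Int) (r : PySem.Dict Int Int), (dl.map (·.1)).Nodup →
      (((PySem.Dict.mk dl).insert x ((PySem.Dict.mk dl).getD x 0 + 1)).items).foldl
          (fun r p => incBy r p.1 p.2) r
        = incBy (dl.foldl (fun r p => incBy r p.1 p.2) r) x 1 := by
  induction dl with
  | nil =>
    intro x r _
    have hc : (PySem.Dict.mk ([] : List (Int × Int))).contains x = false := by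
      rw [PySem.Dict.contains_mk]; rfl
    rw [PySem.Dict.items_insert_of_not_contains _ _ hc]
    simp [PySem.Dict.getD_eq_get?_getD, PySem.Dict.get?]
  | cons p t ih =>
    intro x r hnd
    obtain ⟨y, u⟩ := p
    rw [List.map_cons, List.nodup_cons] at hnd
    by_cases hyx : y = x
    · subst hyx
      have hgd : (PySem.Dict.mk ((y, u) :: t)).getD y 0 = u := by
        rw [PySem.Dict.getD_eq_get?_getD, PySem.Dict.get?_mk_cons]; simp
      rw [hgd, insert_items_cons_self y u t (u + 1) (by simpa using hnd.1)]
      simp only [List.foldl_cons]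
      rw [show incBy r y (u + 1) = incBy (incBy r y u) y 1 from incBy_add r y u 1]
      exact foldl_incBy_comm t y 1 (incBy r y u)
        (fun q hq hqy => hnd.1 (by rw [← hqy]; exact List.mem_map_of_mem (f := fun p => p.1) hq))
    · have hgd : (PySem.Dict.mk ((y, u) :: t)).getD x 0 = (PySem.Dict.mk t).getD x 0 := by
        rw [PySem.Dict.getD_eq_get?_getD, PySem.Dict.getD_eq_get?_getD,
            PySem.Dict.get?_mk_cons, if_neg (by simpa using hyx)]
      rw [hgd, insert_items_cons_ne y u t x _ hyx]
      simp only [List.foldl_cons]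
      exact ih x (incBy r y u) hnd.2

-- the crux: applying Counter(ws) once equals applying the per-occurrence +1 updates of ws
theorem counter_foldl_eq (ws : List Int) (r : PySem.Dict Int Int) :
    ((PySem.Dict.counter ws).items).foldl (fun r p => incBy r p.1 p.2) r
      = ws.foldl (fun r x => incBy r x 1) r := by
  induction ws using List.reverseRecOn with
  | nil => rfl
  | append_singleton t x ih =>
    rw [PySem.Dict.counter_append_singleton,
        show (PySem.Dict.counter t).modify x 0 (fun v => v + 1)
          = (PySem.Dict.counter t).insert x ((PySem.Dict.counter t).getD x 0 + 1) from rfl]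
    have hnd : ((PySem.Dict.counter t).items.map (·.1)).Nodup := PySem.Dict.nodup_keys_counter t
    have h2 := foldl_items_insert_inc (PySem.Dict.counter t).items x r hnd
    rw [show PySem.Dict.mk (PySem.Dict.counter t).items = PySem.Dict.counter t from rfl] at h2
    rw [h2, ih]
    simp [List.foldl_append]

-- A's loop, run from a state whose core row is `row`, rewrites exactly the core row
theorem A_loop (w : List Int) (k core : Int) (hcore : PySem.List.pyGet? w k = some core)
    (l : List Int) :
    ∀ (d : PySem.Dict Int (PySem.Dict Int Int)) (row : PySem.Dict Int Int),
      d.keys.Nodup → d.get? core = some row →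
      l.foldl (stepA w k) d =
        d.insert core
          ((l.filterMap (fun i => if i = k then none else PySem.List.pyGet? w i)).foldl
            (fun r x => incBy r x 1) row) := by
  induction l with
  | nil =>
    intro d row hnd hrow
    obtain ⟨dl⟩ := d
    exact (insert_eq_self_of_nodup dl core row hnd hrow).symm
  | cons i l ih =>
    intro d row hnd hrow
    by_cases hik : i = k
    · rw [show (i :: l).foldl (stepA w k) d = l.foldl (stepA w k) d by
            rw [List.foldl_cons, show stepA w k d i = d by simp [stepA, hik]],
          show (i :: l).filterMap (fun i => if i = k then none else PySem.List.pyGet? w i)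
              = l.filterMap (fun i => if i = k then none else PySem.List.pyGet? w i) by
            simp [hik]]
      exact ih d row hnd hrow
    · cases hw : PySem.List.pyGet? w i with
      | none =>
        rw [show (i :: l).foldl (stepA w k) d = l.foldl (stepA w k) d by
              rw [List.foldl_cons, show stepA w k d i = d by simp [stepA, hik, hcore, hw]],
            show (i :: l).filterMap (fun i => if i = k then none else PySem.List.pyGet? w i)
                = l.filterMap (fun i => if i = k then none else PySem.List.pyGet? w i) by
              simp [hik, hw]]
        exact ih d row hnd hrow
      | some wi =>
        rw [show (i :: l).filterMap (fun i => if i = k then none else PySem.List.pyGet? w i)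
              = wi :: l.filterMap (fun i => if i = k then none else PySem.List.pyGet? w i) by
            simp [hik, hw]]
        simp only [List.foldl_cons]
        cases hv : row.get? wi with
        | none =>
          rw [show stepA w k d i = d by simp [stepA, hik, hcore, hw, hrow, hv],
              incBy_of_none row wi 1 hv]
          exact ih d row hnd hrow
        | some v =>
          rw [show stepA w k d i = d.insert core (row.insert wi (v + 1)) by
                simp [stepA, hik, hcore, hw, hrow, hv],
              incBy_of_some row wi 1 v hv]
          rw [ih (d.insert core (row.insert wi (v + 1))) (row.insert wi (v + 1))
                (PySem.Dict.nodup_keys_insert d core _ hnd)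
                (PySem.Dict.get?_insert_self d core _),
              PySem.Dict.insert_insert_self]

-- the neighbor-word list both ports effectively traverse
def neighWords (w : List Int) (k : Int) : List Int :=
  (PySem.List.pyRange 0 (w.length : Int) 1).filterMap
    (fun i => if i = k then none else PySem.List.pyGet? w i)

theorem pyGet?_in_range (w : List Int) (i : Int) (h0 : 0 ≤ i) (h1 : i < (w.length : Int)) :
    PySem.List.pyGet? w i = some (PySem.List.pyGetD w i 0) := by
  obtain ⟨n, rfl⟩ : ∃ n : Nat, i = (n : Int) := ⟨i.toNat, (Int.toNat_of_nonneg h0).symm⟩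
  have hlt : n < w.length := by exact_mod_cast h1
  rw [PySem.List.pyGet?_natCast, List.getElem?_eq_getElem hlt,
      PySem.List.pyGetD_eq_getElem w 0 (by positivity) h1]
  simp

theorem ws_filter_eq (w : List Int) (k : Int) (l : List Int)
    (h : ∀ i ∈ l, 0 ≤ i ∧ i < (w.length : Int)) :
    l.filterMap (fun i => if i = k then none else PySem.List.pyGet? w i)
      = (l.filter (fun j => decide ¬(j = k))).map (fun j => PySem.List.pyGetD w j 0) := by
  induction l with
  | nil => rfl
  | cons i l ih =>
    have hi := h i (by simp)
    have ih' := ih (fun j hj => h j (by simp [hj]))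
    by_cases hik : i = k
    · simp only [List.filterMap_cons, List.filter_cons, hik]
      simpa using ih'
    · simp only [List.filterMap_cons, List.filter_cons, if_neg hik,
        pyGet?_in_range w i hi.1 hi.2]
      simp [hik, ih']

-- B's tally loop builds exactly Counter(neighWords)
theorem counts_eq (w : List Int) (k : Int) :
    (PySem.List.enumerate w).foldl
        (fun d p => if p.1 = k then d else d.insert p.2 (d.getD p.2 0 + 1)) PySem.Dict.empty
      = PySem.Dict.counter (neighWords w k) := by
  rw [PySem.List.foldl_congr_mem (PySem.List.enumerate w)
        (fun (d : PySem.Dict Int Int) (p : Int × Int) => if p.1 = k then d else d.insert p.2 (d.getD p.2 0 + 1))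
        (fun (d : PySem.Dict Int Int) (p : Int × Int) => if ¬(p.1 = k) then d.insert p.2 (d.getD p.2 0 + 1) else d)
        PySem.Dict.empty
        (by intro d p _; by_cases h : p.1 = k <;> simp [h])]
  rw [PySem.List.foldl_ite_eq_foldl_filter (fun p : Int × Int => ¬(p.1 = k))
        (fun (d : PySem.Dict Int Int) (p : Int × Int) => d.insert p.2 (d.getD p.2 0 + 1))
        (PySem.List.enumerate w) PySem.Dict.empty]
  rw [show List.foldl (fun (d : PySem.Dict Int Int) (p : Int × Int) => d.insert p.2 (d.getD p.2 0 + 1))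
          PySem.Dict.empty
          ((PySem.List.enumerate w).filter (fun p => decide ¬(p.1 = k)))
        = List.foldl (fun (d : PySem.Dict Int Int) x => d.insert x (d.getD x 0 + 1))
          PySem.Dict.empty
          (((PySem.List.enumerate w).filter (fun p => decide ¬(p.1 = k))).map (·.2))
      from (List.foldl_map (f := fun p : Int × Int => p.2)
          (g := fun (d : PySem.Dict Int Int) x => d.insert x (d.getD x 0 + 1))
          (l := (PySem.List.enumerate w).filter (fun p => decide ¬(p.1 = k)))
          (init := PySem.Dict.empty)).symm]
  rw [PySem.Dict.foldl_insert_getD_add_one_eq_counter]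
  congr 1
  rw [PySem.List.enumerate_eq_map_pyRange w 0, List.filter_map, List.map_map]
  unfold neighWords
  rw [ws_filter_eq w k _ (fun i hi => by
        rw [PySem.List.mem_pyRange_one] at hi
        exact ⟨hi.1, hi.2⟩)]
  congr 1

theorem fromD_toD (c : List (Int × List (Int × Int))) : coocFromD (coocToD c) = c := by
  simp [coocFromD, coocToD, List.map_map, Function.comp_def]

theorem keys_toD (c : List (Int × List (Int × Int))) :
    (coocToD c).keys = c.map (·.1) := by
  simp [coocToD, PySem.Dict.keys, List.map_map]

theorem main_eq (c : List (Int × List (Int × Int))) (w : List Int) (k : Int)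
    (hpre : Pre_countCOOC c w k) : countCOOC c w k = countCOOC_alt c w k := by
  unfold Pre_countCOOC preCOOC at hpre
  simp only [Bool.and_eq_true, decide_eq_true_eq, List.all_eq_true] at hpre
  obtain ⟨hnd, hall⟩ := hpre
  have hndD : (coocToD c).keys.Nodup := by rw [keys_toD]; exact hnd
  by_cases hE : ∃ i : Nat, i < w.length ∧ ((i : Nat) : Int) ≠ k
  · obtain ⟨i0, hi0, hi0k⟩ := hE
    have h0 := hall i0 (List.mem_range.mpr hi0)
    simp only [Bool.or_eq_true, beq_iff_eq] at h0
    rcases h0 with h0 | hM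
    · exact absurd h0 hi0k
    cases hcore : PySem.List.pyGet? w k with
    | none => rw [hcore] at hM; simp at hM
    | some core =>
      simp only [hcore] at hM
      cases hrow : (coocToD c).get? core with
      | none => simp only [hrow] at hM; simp at hM
      | some row0 =>
        have hw0 : PySem.List.pyGet? w ((i0 : Nat) : Int) =
            some (PySem.List.pyGetD w ((i0 : Nat) : Int) 0) :=
          pyGet?_in_range w _ (by positivity) (by exact_mod_cast hi0)
        have hx : PySem.List.pyGetD w ((i0 : Nat) : Int) 0 ∈ neighWords w k := by
          unfold neighWords
          refine List.mem_filterMap.mpr ⟨((i0 : Nat) : Int), ?_, ?_⟩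
          · exact PySem.List.mem_pyRange_one.mpr ⟨by positivity, by exact_mod_cast hi0⟩
          · rw [if_neg hi0k, hw0]
        have hmem : ((PySem.Dict.counter (neighWords w k)).items).isEmpty = false := by
          rw [PySem.Dict.items_counter]
          have h1 : (PySem.List.pyGetD w ((i0 : Nat) : Int) 0,
                ((neighWords w k).count (PySem.List.pyGetD w ((i0 : Nat) : Int) 0) : Int))
              ∈ (PySem.Set.ofList (neighWords w k)).map
                  (fun x => (x, ((neighWords w k).count x : Int))) :=
            List.mem_map_of_mem ((PySem.Set.mem_ofList _ _).mpr hx)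
          obtain ⟨y, ys, hys⟩ := List.exists_cons_of_ne_nil (List.ne_nil_of_mem h1)
          rw [hys]
          rfl
        unfold countCOOC
        rw [A_loop w k core hcore _ (coocToD c) row0 hndD hrow]
        unfold countCOOC_alt
        simp only [counts_eq w k, hmem, Bool.false_eq_true, if_false, hcore, hrow]
        exact congrArg coocFromD
          (congrArg ((coocToD c).insert core) (counter_foldl_eq (neighWords w k) row0).symm)
  · push Not at hE
    have hstep : ∀ (acc : PySem.Dict Int (PySem.Dict Int Int)),
        ∀ i ∈ PySem.List.pyRange 0 (w.length : Int) 1, stepA w k acc i = acc := by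
      intro acc i hi
      rw [PySem.List.mem_pyRange_one] at hi
      have hik : i = k := by
        have h1 : i = ((i.toNat : Nat) : Int) := (Int.toNat_of_nonneg hi.1).symm
        have h2 : i.toNat < w.length := by omega
        rw [h1]; exact hE i.toNat h2
      simp [stepA, hik]
    have htallies : ∀ (d : PySem.Dict Int Int), ∀ p ∈ PySem.List.enumerate w,
        (if p.1 = k then d else d.insert p.2 (d.getD p.2 0 + 1)) = d := by
      intro d p hp
      rw [PySem.List.mem_enumerate_iff] at hp
      obtain ⟨j, hj, rfl⟩ := hp
      rw [if_pos (by simpa using hE j hj)]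
    unfold countCOOC
    rw [PySem.List.foldl_congr_mem _ _ (fun acc _ => acc) _ hstep, PySem.List.foldl_ignore,
        fromD_toD]
    unfold countCOOC_alt
    rw [PySem.List.foldl_congr_mem _ _ (fun d _ => d) _ htallies, PySem.List.foldl_ignore]
    rfl

-- ===== VERDICT (by name: the statement is the Claim_ definition above) =====
theorem countCOOC_spec : Claim_equal_countCOOC := by
  intro c w k _ hpre
  exact main_eq c w k hpre
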